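-- pv_equiv track=rewrite | github.com/Cryogenic2005/Advent-of-Code | 2024/src/gold/D6.py | step
-- ===== SOURCE A (Python) =====
-- def outside(map: list[list[str]], x: int, y: int) -> bool:
--     return x < 0 or x >= len(map) or y < 0 or y >= len(map[0])
--
-- def step(map: list[list[str]], x: int, y: int, dir: tuple[int,int]) -> tuple[int,int]:
--     nextX = x + dir[0]
--     nextY = y + dir[1]
--
--     if outside(map, nextX, nextY):
--         return (nextX, nextY, dir)
--
--     if map[nextY][nextX] == '#':
--         rot270 = (-dir[1], dir[0])
--         return step(map, x, y, rot270)
--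
--     return (nextX, nextY, dir)
-- ===== SOURCE B (Python) =====
-- def step(map: list[list[str]], x: int, y: int, dir: tuple[int, int]) -> tuple[int, int]:
--     # The 270-degree rotation has period 4, so the candidate directions are known
--     # up front: try each in order and return the first whose next cell is passable.
--     dx, dy = dir
--     for d in ((dx, dy), (-dy, dx), (-dx, -dy), (dy, -dx)):
--         nx, ny = x + d[0], y + d[1]
--         if not (0 <= nx < len(map) and 0 <= ny < len(map[0])) or map[ny][nx] != '#':
--             return (nx, ny, d)
--     raise ValueError("guard is boxed in")
-- ===== Notes on version B (the rewrite author's own statement) =====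
-- stated objective: alternative
-- what changed: Instead of A's tail recursion that re-enters step with a rotated dir, B enumerates the four possible rotations of dir in closed form up front and returns for the first candidate whose next cell is out of bounds or not '#'; bounds are tested positively (0 <= nx < len) rather than via the outside helper.
import Mathlib
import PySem

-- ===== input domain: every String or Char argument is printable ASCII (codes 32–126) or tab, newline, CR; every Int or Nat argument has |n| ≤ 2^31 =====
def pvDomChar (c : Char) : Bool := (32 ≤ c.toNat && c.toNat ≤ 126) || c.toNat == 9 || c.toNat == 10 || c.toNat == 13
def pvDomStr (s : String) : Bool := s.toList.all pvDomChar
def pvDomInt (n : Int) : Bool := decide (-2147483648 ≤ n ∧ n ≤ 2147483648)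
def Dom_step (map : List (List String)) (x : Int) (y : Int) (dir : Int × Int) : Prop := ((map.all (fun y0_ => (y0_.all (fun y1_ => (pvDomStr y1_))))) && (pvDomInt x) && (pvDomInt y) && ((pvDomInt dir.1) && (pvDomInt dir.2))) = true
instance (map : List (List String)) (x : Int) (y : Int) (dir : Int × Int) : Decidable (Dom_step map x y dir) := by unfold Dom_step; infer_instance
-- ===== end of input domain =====

-- B replaces A's tail recursion by a closed-form enumeration of the four rotations of dir,
-- returning the first passable candidate (objective: alternative); same values wherever A returns.

-- ===== PORT A =====
-- module helper 'outside'; len(map[0]) is only reached when len(map) > 0, and then the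
-- getD default [] is irrelevant, so this total form is exact
def outsidePy (map : List (List String)) (x : Int) (y : Int) : Bool :=
  decide (x < 0) || decide ((map.length : Int) ≤ x) || decide (y < 0) ||
    decide ((((PySem.List.pyGet? map 0).getD []).length : Int) ≤ y)

-- map[nextY][nextX]; none = IndexError (ragged row), excluded by Pre_step
def cellAt (map : List (List String)) (nx : Int) (ny : Int) : Option String :=
  (PySem.List.pyGet? map ny).bind (fun row => PySem.List.pyGet? row nx)

-- A's recursion, with fuel: the rotation has period 4, so a run of the Python that does not
-- return within 4 calls never returns at all; fuel 0 is unreachable under Pre_step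
def stepRec (map : List (List String)) (x : Int) (y : Int) : Nat → (Int × Int) → Int × Int × (Int × Int)
  | 0, dir => (x + dir.1, y + dir.2, dir)
  | Nat.succ n, dir =>
      let nextX := x + dir.1
      let nextY := y + dir.2
      if outsidePy map nextX nextY then (nextX, nextY, dir)
      else if cellAt map nextX nextY = some "#" then
        stepRec map x y n (-dir.2, dir.1)
      else (nextX, nextY, dir)

def step (map : List (List String)) (x : Int) (y : Int) (dir : Int × Int) : Int × Int × (Int × Int) :=
  stepRec map x y 4 dir

-- ===== PORT B =====
-- the four rotations of dir, written out in closed form as in Source B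
def candDirs (dir : Int × Int) : List (Int × Int) :=
  [(dir.1, dir.2), (-dir.2, dir.1), (-dir.1, -dir.2), (dir.2, -dir.1)]

-- Source B's loop-body test: next cell out of bounds (positively: not 0 <= nx < len …) or ≠ '#';
-- the != '#' comparison on a cell Source B cannot index (ragged row ⇒ IndexError) is excluded by Pre_step
def passable (map : List (List String)) (x : Int) (y : Int) (d : Int × Int) : Bool :=
  let nx := x + d.1
  let ny := y + d.2
  !(decide (0 ≤ nx) && decide (nx < (map.length : Int)) && decide (0 ≤ ny) &&
      decide (ny < (((PySem.List.pyGet? map 0).getD []).length : Int)))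
  || ((PySem.List.pyGet? map ny).bind (fun row => PySem.List.pyGet? row nx)) != some "#"

def step_alt (map : List (List String)) (x : Int) (y : Int) (dir : Int × Int) : Int × Int × (Int × Int) :=
  match (candDirs dir).find? (passable map x y) with
  | some d => (x + d.1, y + d.2, d)
  | none => (x + dir.1, y + dir.2, dir)  -- unreachable under Pre_step (Source B raises ValueError here)

-- ===== PRECONDITION & SPEC =====
def rotN : Nat → (Int × Int) → Int × Int
  | 0, d => d
  | Nat.succ n, d => rotN n (-d.2, d.1)

-- direction d makes A return: next cell out of bounds, or indexable and ≠ '#'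
def stopsB (map : List (List String)) (x : Int) (y : Int) (d : Int × Int) : Bool :=
  outsidePy map (x + d.1) (y + d.2) ||
    (match cellAt map (x + d.1) (y + d.2) with
     | none => false
     | some c => c != "#")

-- direction d makes A rotate: in bounds and the cell is '#'
def blockedB (map : List (List String)) (x : Int) (y : Int) (d : Int × Int) : Bool :=
  (!outsidePy map (x + d.1) (y + d.2)) && (cellAt map (x + d.1) (y + d.2) == some "#")

-- Pre_ excludes exactly the inputs on which the Python A does not return: an IndexError on a
-- ragged map row, or infinite recursion when all four rotations are blocked.
def Pre_step (map : List (List String)) (x : Int) (y : Int) (dir : Int × Int) : Prop :=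
  ∃ k, k < 4 ∧ stopsB map x y (rotN k dir) = true ∧ ∀ j, j < k → blockedB map x y (rotN j dir) = true

instance (map : List (List String)) (x : Int) (y : Int) (dir : Int × Int) : Decidable (Pre_step map x y dir) := by
  unfold Pre_step; infer_instance

def pvWitness_step : List (List String) × Int × Int × (Int × Int) :=
  ([[".", "."], [".", "."]], 0, 0, (1, 0))

def Spec_step (map : List (List String)) (x : Int) (y : Int) (dir : Int × Int) (out : Int × Int × (Int × Int)) : Prop := out = step_alt map x y dir
instance (map : List (List String)) (x : Int) (y : Int) (dir : Int × Int) (out : Int × Int × (Int × Int)) : Decidable (Spec_step map x y dir out) := by unfold Spec_step; infer_instance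

-- ===== CLAIM (what is proved, stated in full; the proofs are below) =====
def Claim_equal_step : Prop := ∀ (map : List (List String)) (x : Int) (y : Int) (dir : Int × Int), Dom_step map x y dir → Pre_step map x y dir → Spec_step map x y dir (step map x y dir)

-- ===== LEMMAS AND PROOFS =====
theorem passable_of_stops (map : List (List String)) (x y : Int) (d : Int × Int)
    (h : stopsB map x y d = true) : passable map x y d = true := by
  unfold passable stopsB outsidePy cellAt at *
  cases hc : (PySem.List.pyGet? map (y + d.2)).bind (fun row => PySem.List.pyGet? row (x + d.1)) with
  | none => simp [hc]
  | some c =>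
      simp only [hc] at h ⊢
      simp only [Bool.or_eq_true, decide_eq_true_eq, bne_iff_ne, ne_eq] at h
      rcases h with hbnd | hne
      · apply Bool.or_eq_true_iff.mpr; left
        simp only [Bool.not_eq_eq_eq_not, Bool.not_true, Bool.and_eq_false_iff,
          decide_eq_false_iff_not, not_lt, not_le]
        omega
      · apply Bool.or_eq_true_iff.mpr; right
        simp [hne]

theorem not_passable_of_blocked (map : List (List String)) (x y : Int) (d : Int × Int)
    (h : blockedB map x y d = true) : passable map x y d = false := by
  unfold blockedB at h
  simp only [Bool.and_eq_true, Bool.not_eq_eq_eq_not, Bool.not_true, beq_iff_eq] at h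
  obtain ⟨ho, hc⟩ := h
  unfold outsidePy at ho
  simp only [Bool.or_eq_false_iff, decide_eq_false_iff_not, not_lt, not_le] at ho
  unfold cellAt at hc
  unfold passable
  simp only [hc, Bool.or_eq_false_iff, Bool.not_eq_eq_eq_not, Bool.not_false, bne_eq_false_iff_eq]
  refine ⟨?_, trivial⟩
  simp only [Bool.and_eq_true, decide_eq_true_eq]
  omega

theorem stepRec_stop (map : List (List String)) (x y : Int) (n : Nat) (d : Int × Int)
    (h : stopsB map x y d = true) : stepRec map x y (n + 1) d = (x + d.1, y + d.2, d) := by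
  unfold stopsB at h
  simp only [stepRec]
  rcases Bool.or_eq_true_iff.mp h with h1 | h2
  · simp [h1]
  · cases hc : cellAt map (x + d.1) (y + d.2) with
    | none => simp [hc] at h2
    | some c =>
        simp only [hc] at h2
        by_cases ho : outsidePy map (x + d.1) (y + d.2) = true
        · simp [ho]
        · simp only [Bool.not_eq_true] at ho
          simp only [ho]
          have : ¬ (some c = some "#") := by simpa using h2
          simp [this]

theorem stepRec_go (map : List (List String)) (x y : Int) (n : Nat) (d : Int × Int)
    (h : blockedB map x y d = true) :
    stepRec map x y (n + 1) d = stepRec map x y n (-d.2, d.1) := by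
  unfold blockedB at h
  simp only [Bool.and_eq_true, Bool.not_eq_eq_eq_not, Bool.not_true, beq_iff_eq] at h
  simp [stepRec, h.1, h.2]

-- ===== VERDICT (by name: the statement is the Claim_ definition above) =====
theorem step_spec : Claim_equal_step := by
  intro map x y dir _ hpre
  unfold Spec_step step step_alt
  obtain ⟨k, hk, hs, hb⟩ := hpre
  interval_cases k
  · -- stops immediately
    have hs0 : stopsB map x y dir = true := hs
    have hA : stepRec map x y 4 dir = (x + dir.1, y + dir.2, dir) :=
      stepRec_stop map x y 3 dir hs0
    have p0 : passable map x y (dir.1, dir.2) = true := passable_of_stops map x y _ hs0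
    rw [hA]; simp [candDirs, p0]
  · have h0 : blockedB map x y dir = true := hb 0 (by omega)
    have hs1 : stopsB map x y (-dir.2, dir.1) = true := hs
    have hA : stepRec map x y 4 dir = (x + -dir.2, y + dir.1, (-dir.2, dir.1)) :=
      calc stepRec map x y 4 dir = stepRec map x y 3 (-dir.2, dir.1) :=
            stepRec_go map x y 3 dir h0
        _ = _ := stepRec_stop map x y 2 _ hs1
    have p0 : passable map x y (dir.1, dir.2) = false := not_passable_of_blocked map x y _ h0
    have p1 : passable map x y (-dir.2, dir.1) = true := passable_of_stops map x y _ hs1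
    rw [hA]; simp [candDirs, p0, p1]
  · have h0 : blockedB map x y dir = true := hb 0 (by omega)
    have h1 : blockedB map x y (-dir.2, dir.1) = true := hb 1 (by omega)
    have hs2 : stopsB map x y (-dir.1, -dir.2) = true := hs
    have hA : stepRec map x y 4 dir = (x + -dir.1, y + -dir.2, (-dir.1, -dir.2)) :=
      calc stepRec map x y 4 dir = stepRec map x y 3 (-dir.2, dir.1) :=
            stepRec_go map x y 3 dir h0
        _ = stepRec map x y 2 (-dir.1, -dir.2) := stepRec_go map x y 2 _ h1
        _ = _ := stepRec_stop map x y 1 _ hs2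
    have p0 : passable map x y (dir.1, dir.2) = false := not_passable_of_blocked map x y _ h0
    have p1 : passable map x y (-dir.2, dir.1) = false := not_passable_of_blocked map x y _ h1
    have p2 : passable map x y (-dir.1, -dir.2) = true := passable_of_stops map x y _ hs2
    rw [hA]; simp [candDirs, p0, p1, p2]
  · have h0 : blockedB map x y dir = true := hb 0 (by omega)
    have h1 : blockedB map x y (-dir.2, dir.1) = true := hb 1 (by omega)
    have h2 : blockedB map x y (-dir.1, -dir.2) = true := hb 2 (by omega)
    have hs3 : stopsB map x y (dir.2, -dir.1) = true := by
      have h' : stopsB map x y (-(-dir.2), -dir.1) = true := hs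
      rwa [neg_neg] at h'
    have hA : stepRec map x y 4 dir = (x + dir.2, y + -dir.1, (dir.2, -dir.1)) :=
      calc stepRec map x y 4 dir = stepRec map x y 3 (-dir.2, dir.1) :=
            stepRec_go map x y 3 dir h0
        _ = stepRec map x y 2 (-dir.1, -dir.2) := stepRec_go map x y 2 _ h1
        _ = stepRec map x y 1 (-(-dir.2), -dir.1) := stepRec_go map x y 1 _ h2
        _ = stepRec map x y 1 (dir.2, -dir.1) := by rw [neg_neg]
        _ = _ := stepRec_stop map x y 0 _ hs3
    have p0 : passable map x y (dir.1, dir.2) = false := not_passable_of_blocked map x y _ h0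
    have p1 : passable map x y (-dir.2, dir.1) = false := not_passable_of_blocked map x y _ h1
    have p2 : passable map x y (-dir.1, -dir.2) = false := not_passable_of_blocked map x y _ h2
    have p3 : passable map x y (dir.2, -dir.1) = true := passable_of_stops map x y _ hs3
    rw [hA]; simp [candDirs, p0, p1, p2, p3]
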